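-- pv_equiv track=rewrite | github.com/xaxdh123/inklink2026 | layout_center/Roll_Splice/get_best4.py | compress_same_type_blocks
-- ===== SOURCE A (Python) =====
-- def compress_same_type_blocks(blocks):
--     out = []
--     for nm, nrows in blocks:
--         if nrows <= 0:
--             continue
--         if out and out[-1][0] == nm:
--             out[-1] = (nm, out[-1][1] + nrows)
--         else:
--             out.append((nm, nrows))
--     return out
-- ===== SOURCE B (Python) =====
-- def compress_same_type_blocks(blocks):
--     positive = [b for b in blocks if b[1] > 0]
--     out = []
--     i = 0
--     n = len(positive)
--     while i < n:
--         nm = positive[i][0]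
--         total = 0
--         j = i
--         while j < n and positive[j][0] == nm:
--             total += positive[j][1]
--             j += 1
--         out.append((nm, total))
--         i = j
--     return out
-- ===== Notes on version B (the rewrite author's own statement) =====
-- stated objective: alternative
-- what changed: B filters out non-positive blocks first, then splits the filtered list into maximal consecutive same-name runs and emits each run's name with its summed row count, instead of A's in-place merge into the last element of a growing output list.
import Mathlib
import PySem

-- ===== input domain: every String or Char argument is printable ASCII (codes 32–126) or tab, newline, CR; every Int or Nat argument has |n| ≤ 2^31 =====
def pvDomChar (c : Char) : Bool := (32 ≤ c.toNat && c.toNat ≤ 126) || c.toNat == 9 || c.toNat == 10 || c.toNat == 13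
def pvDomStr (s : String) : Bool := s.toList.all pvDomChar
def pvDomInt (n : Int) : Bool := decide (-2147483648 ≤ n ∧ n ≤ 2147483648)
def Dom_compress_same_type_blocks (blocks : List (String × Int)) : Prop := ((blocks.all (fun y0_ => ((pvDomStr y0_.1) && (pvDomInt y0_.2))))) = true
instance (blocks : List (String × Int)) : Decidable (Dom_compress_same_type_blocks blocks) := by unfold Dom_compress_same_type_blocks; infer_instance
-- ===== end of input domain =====

-- B filters out non-positive blocks first, then splits the filtered list into maximal
-- consecutive same-name runs, summing each run — instead of A's in-place merge into the
-- last element of a growing output list (objective: alternative decomposition).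

-- ===== PORT A =====
-- merge step of A's loop body (the non-`continue` branch): merge into the last element
-- of `out` when the names match, else append.
def pvMergeLast (out : List (String × Int)) (p : String × Int) : List (String × Int) :=
  match out.getLast? with
  | some q => if q.1 = p.1 then out.dropLast ++ [(p.1, q.2 + p.2)] else out ++ [p]
  | none => out ++ [p]

def compress_same_type_blocks (blocks : List (String × Int)) : List (String × Int) :=
  blocks.foldl (fun out p => if p.2 ≤ 0 then out else pvMergeLast out p) []

-- ===== PORT B =====
-- split into maximal consecutive same-name runs, summing each run
def pvGroupRuns : List (String × Int) → List (String × Int)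
  | [] => []
  | p :: t =>
      (p.1, p.2 + ((t.takeWhile (fun q => q.1 == p.1)).map Prod.snd).sum)
        :: pvGroupRuns (t.dropWhile (fun q => q.1 == p.1))
  termination_by l => l.length
  decreasing_by
    exact Nat.lt_succ_of_le (List.Sublist.length_le (List.dropWhile_sublist _))

def compress_same_type_blocks_alt (blocks : List (String × Int)) : List (String × Int) :=
  pvGroupRuns (blocks.filter (fun b => 0 < b.2))

-- ===== PRECONDITION & SPEC =====
def Spec_compress_same_type_blocks (blocks : List (String × Int)) (out : List (String × Int)) : Prop := out = compress_same_type_blocks_alt blocks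
instance (blocks : List (String × Int)) (out : List (String × Int)) : Decidable (Spec_compress_same_type_blocks blocks out) := by unfold Spec_compress_same_type_blocks; infer_instance

-- ===== CLAIM (what is proved, stated in full; the proofs are below) =====
def Claim_equal_compress_same_type_blocks : Prop := ∀ (blocks : List (String × Int)), Dom_compress_same_type_blocks blocks → Spec_compress_same_type_blocks blocks (compress_same_type_blocks blocks)

-- ===== LEMMAS AND PROOFS =====

-- A's fold ignores non-positive blocks, so it equals a pure fold of pvMergeLast over the filtered list.
theorem pv_foldA_filter (blocks : List (String × Int)) (out : List (String × Int)) :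
    blocks.foldl (fun out p => if p.2 ≤ 0 then out else pvMergeLast out p) out
      = (blocks.filter (fun b => 0 < b.2)).foldl pvMergeLast out := by
  induction blocks generalizing out with
  | nil => rfl
  | cons p t ih =>
    by_cases h : p.2 ≤ 0
    · simp [h, ih, show ¬ (0 < p.2) by omega]
    · simp [h, ih, show 0 < p.2 by omega]

-- folding pvMergeLast over a run whose names are all nm, starting from a list ending in (nm, s),
-- accumulates the run's sum into that last element.
theorem pv_fold_run (w : List (String × Int)) (pre : List (String × Int)) (nm : String) (s : Int)
    (hw : ∀ q ∈ w, q.1 = nm) :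
    w.foldl pvMergeLast (pre ++ [(nm, s)]) = pre ++ [(nm, s + (w.map Prod.snd).sum)] := by
  induction w generalizing s with
  | nil => simp
  | cons q t ih =>
    have hq : q.1 = nm := hw q (by simp)
    have hstep : pvMergeLast (pre ++ [(nm, s)]) q = pre ++ [(nm, s + q.2)] := by
      simp [pvMergeLast, hq.symm]
    rw [List.foldl_cons, hstep, ih (s + q.2) (fun x hx => hw x (by simp [hx]))]
    simp; ring

-- one step: folding pvMergeLast over a run of name nm starting from pvMergeLast out (nm, nr)
-- is the same as a single merge of the run's total.
theorem pv_merge_run (out : List (String × Int)) (nm : String) (nr : Int)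
    (w : List (String × Int)) (hw : ∀ q ∈ w, q.1 = nm) :
    w.foldl pvMergeLast (pvMergeLast out (nm, nr))
      = pvMergeLast out (nm, nr + (w.map Prod.snd).sum) := by
  match h : out.getLast? with
  | none =>
      have h1 : pvMergeLast out (nm, nr) = out ++ [(nm, nr)] := by simp [pvMergeLast, h]
      have h2 : pvMergeLast out (nm, nr + (w.map Prod.snd).sum)
          = out ++ [(nm, nr + (w.map Prod.snd).sum)] := by simp [pvMergeLast, h]
      rw [h1, h2, pv_fold_run w out nm nr hw]
  | some q =>
      by_cases hq : q.1 = nm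
      · have h1 : pvMergeLast out (nm, nr) = out.dropLast ++ [(nm, q.2 + nr)] := by
          simp [pvMergeLast, h, hq]
        have h2 : pvMergeLast out (nm, nr + (w.map Prod.snd).sum)
            = out.dropLast ++ [(nm, q.2 + (nr + (w.map Prod.snd).sum))] := by
          simp [pvMergeLast, h, hq]
        rw [h1, h2, pv_fold_run w out.dropLast nm (q.2 + nr) hw]
        have : q.2 + nr + (w.map Prod.snd).sum = q.2 + (nr + (w.map Prod.snd).sum) := by ring
        rw [this]
      · have h1 : pvMergeLast out (nm, nr) = out ++ [(nm, nr)] := by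
          simp [pvMergeLast, h, hq]
        have h2 : pvMergeLast out (nm, nr + (w.map Prod.snd).sum)
            = out ++ [(nm, nr + (w.map Prod.snd).sum)] := by
          simp [pvMergeLast, h, hq]
        rw [h1, h2, pv_fold_run w out nm nr hw]

-- head name of the dropWhile tail differs from nm
theorem pv_dropWhile_head_ne (nm : String) (t : List (String × Int)) :
    ∀ h ∈ (t.dropWhile (fun q => q.1 == nm)).head?, h.1 ≠ nm := by
  intro h hh
  rcases hd : t.dropWhile (fun q => q.1 == nm) with _ | ⟨a, r⟩
  · simp [hd] at hh
  · rw [hd] at hh; simp at hh; subst hh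
    have := List.head?_dropWhile_not (fun q => q.1 == nm) t
    rw [hd] at this
    simpa using this

-- folding pvMergeLast onto `out` of a grouped list whose first name differs from out's
-- last name is plain append.
theorem pv_fold_group_append (l : List (String × Int)) : ∀ (out : List (String × Int)),
    (∀ q ∈ out.getLast?, ∀ h ∈ l.head?, q.1 ≠ h.1) →
    (pvGroupRuns l).foldl pvMergeLast out = out ++ pvGroupRuns l := by
  induction l using pvGroupRuns.induct with
  | case1 => intro out _; simp [pvGroupRuns]
  | case2 p t ih =>
    intro out hout
    rw [pvGroupRuns, List.foldl_cons]
    have hstep : pvMergeLast out (p.1, p.2 + ((t.takeWhile (fun q => q.1 == p.1)).map Prod.snd).sum)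
        = out ++ [(p.1, p.2 + ((t.takeWhile (fun q => q.1 == p.1)).map Prod.snd).sum)] := by
      match h : out.getLast? with
      | none => simp [pvMergeLast, h]
      | some q =>
        have hne := hout q (by simp [h]) p (by simp)
        simp [pvMergeLast, h, hne]
    rw [hstep, ih _ ?_]
    · simp
    · intro q hq h hh
      rw [List.getLast?_concat] at hq
      simp at hq
      subst hq
      exact fun he => pv_dropWhile_head_ne p.1 t h hh he.symm

-- core: folding pvMergeLast over l equals folding it over the grouped list
theorem pv_fold_group (l : List (String × Int)) : ∀ (out : List (String × Int)),
    l.foldl pvMergeLast out = (pvGroupRuns l).foldl pvMergeLast out := by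
  induction l using pvGroupRuns.induct with
  | case1 => intro out; simp [pvGroupRuns]
  | case2 p t ih =>
    intro out
    rw [pvGroupRuns, List.foldl_cons, List.foldl_cons]
    have hw : ∀ q ∈ t.takeWhile (fun q => q.1 == p.1), q.1 = p.1 := by
      intro q hq
      have := List.mem_takeWhile_imp hq
      simpa using this
    have ht : List.foldl pvMergeLast (pvMergeLast out p) t
        = List.foldl pvMergeLast (pvMergeLast out p)
            (t.takeWhile (fun q => q.1 == p.1) ++ t.dropWhile (fun q => q.1 == p.1)) := by
      rw [List.takeWhile_append_dropWhile]
    rw [ht, List.foldl_append]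
    have hp : pvMergeLast out p = pvMergeLast out (p.1, p.2) := by rfl
    rw [hp, pv_merge_run out p.1 p.2 _ hw]
    exact ih _

-- ===== VERDICT (by name: the statement is the Claim_ definition above) =====
theorem compress_same_type_blocks_spec : Claim_equal_compress_same_type_blocks := by
  intro blocks _
  unfold Spec_compress_same_type_blocks compress_same_type_blocks compress_same_type_blocks_alt
  rw [pv_foldA_filter, pv_fold_group,
    pv_fold_group_append _ [] (by intro q hq; simp at hq)]
  simp
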